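-- pv_equiv track=rewrite | github.com/cabeggar/simlive | system.py | _del_sorted_from_sorted
-- ===== SOURCE A (Python) =====
-- def _del_sorted_from_sorted(orig, to_del):
--     idx_orig = 0
--     idx_del = 0
--
--     del_cnt = 0
--
--     while idx_orig < len(orig) and idx_del < len(to_del):
--         if orig[idx_orig] == to_del[idx_del]:
--             del orig[idx_orig]
--             del_cnt += 1
--             idx_del += 1
--         elif orig[idx_orig] > to_del[idx_del]:
--             idx_del += 1
--         else:
--             idx_orig += 1
--
--     return del_cnt
-- ===== SOURCE B (Python) =====
-- def _del_sorted_from_sorted(orig, to_del):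
--     m = len(to_del)
--     j = 0
--     cnt = 0
--     kept = []
--     for x in orig:
--         while j < m and to_del[j] < x:
--             j += 1
--         if j < m and to_del[j] == x:
--             j += 1
--             cnt += 1
--         else:
--             kept.append(x)
--     orig[:] = kept
--     return cnt
-- ===== Notes on version B (the rewrite author's own statement) =====
-- stated objective: faster
-- what changed: Replaces the while-loop that repeatedly calls O(n) `del orig[idx]` with a single for-pass over orig (inner pointer skipping to_del) that builds the kept list once and slice-assigns it back, so each deletion costs O(1) instead of O(n).
import Mathlib
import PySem

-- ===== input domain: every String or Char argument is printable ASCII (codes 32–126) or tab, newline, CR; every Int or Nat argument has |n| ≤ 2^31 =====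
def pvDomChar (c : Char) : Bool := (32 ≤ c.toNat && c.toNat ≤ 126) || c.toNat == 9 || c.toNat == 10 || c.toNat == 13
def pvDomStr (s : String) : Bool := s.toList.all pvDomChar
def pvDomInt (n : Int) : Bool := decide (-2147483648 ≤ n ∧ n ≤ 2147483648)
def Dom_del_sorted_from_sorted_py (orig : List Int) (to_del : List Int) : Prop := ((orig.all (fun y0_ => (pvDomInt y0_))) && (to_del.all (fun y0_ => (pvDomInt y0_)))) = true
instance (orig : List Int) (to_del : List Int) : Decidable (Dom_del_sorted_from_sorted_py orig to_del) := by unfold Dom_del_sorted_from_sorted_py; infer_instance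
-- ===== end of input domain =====

-- B replaces repeated in-place `del` (O(n) each) with one pass building the kept
-- list; both Pythons mutate `orig` to the same final contents, and the theorems
-- here are about the RETURN value (the deletion count).

-- ===== PORT A =====
-- A's while-loop: state = (current orig list, idx_orig, idx_del, del_cnt);
-- `del orig[idx_orig]` is List.eraseIdx.
def pvAloop (orig : List Int) (to_del : List Int) (i j : Nat) (cnt : Int) : Int :=
  if h : i < orig.length ∧ j < to_del.length then
    if orig[i] = to_del[j] then
      pvAloop (orig.eraseIdx i) to_del i (j + 1) (cnt + 1)
    else if orig[i] > to_del[j] then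
      pvAloop orig to_del i (j + 1) cnt
    else
      pvAloop orig to_del (i + 1) j cnt
  else cnt
termination_by (orig.length - i) + (to_del.length - j)
decreasing_by
  · exact Nat.add_lt_add_of_le_of_lt
      (Nat.sub_le_sub_right (List.length_eraseIdx_le orig i) i)
      (Nat.sub_succ_lt_self _ _ h.2)
  · exact Nat.add_lt_add_left (Nat.sub_succ_lt_self _ _ h.2) _
  · exact Nat.add_lt_add_right (Nat.sub_succ_lt_self _ _ h.1) _

def del_sorted_from_sorted_py (orig : List Int) (to_del : List Int) : Int :=
  pvAloop orig to_del 0 0 0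

-- ===== PORT B =====
-- Source B's inner `while j < m and to_del[j] < x: j += 1`
def pvBSkip (to_del : List Int) (x : Int) (j : Nat) : Nat :=
  if h : j < to_del.length then
    if to_del[j] < x then pvBSkip to_del x (j + 1) else j
  else j
termination_by to_del.length - j
decreasing_by exact Nat.sub_succ_lt_self _ _ h

-- Source B's for-loop over orig (the `kept` list only feeds the `orig[:] = kept`
-- mutation, not the return value, so it is not carried here).
def pvBGo (to_del : List Int) (xs : List Int) (j : Nat) (cnt : Int) : Int :=
  match xs with
  | [] => cnt
  | x :: rest =>
    let j' := pvBSkip to_del x j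
    if h : j' < to_del.length then
      if to_del[j'] = x then pvBGo to_del rest (j' + 1) (cnt + 1)
      else pvBGo to_del rest j' cnt
    else pvBGo to_del rest j' cnt

def del_sorted_from_sorted_py_alt (orig : List Int) (to_del : List Int) : Int :=
  pvBGo to_del orig 0 0

-- ===== PRECONDITION & SPEC =====
def Spec_del_sorted_from_sorted_py (orig : List Int) (to_del : List Int) (out : Int) : Prop := out = del_sorted_from_sorted_py_alt orig to_del
instance (orig : List Int) (to_del : List Int) (out : Int) : Decidable (Spec_del_sorted_from_sorted_py orig to_del out) := by unfold Spec_del_sorted_from_sorted_py; infer_instance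

-- ===== CLAIM (what is proved, stated in full; the proofs are below) =====
def Claim_equal_del_sorted_from_sorted_py : Prop := ∀ (orig : List Int) (to_del : List Int), Dom_del_sorted_from_sorted_py orig to_del → Spec_del_sorted_from_sorted_py orig to_del (del_sorted_from_sorted_py orig to_del)

-- ===== LEMMAS AND PROOFS =====

-- A's loop seen on the suffix of orig from idx_orig on (deletion = dropping the head).
def pvAux (to_del : List Int) (xs : List Int) (j : Nat) (cnt : Int) : Int :=
  match xs with
  | [] => cnt
  | x :: rest =>
    if h : j < to_del.length then
      if x = to_del[j] then pvAux to_del rest (j + 1) (cnt + 1)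
      else if x > to_del[j] then pvAux to_del (x :: rest) (j + 1) cnt
      else pvAux to_del rest j cnt
    else cnt
termination_by xs.length + (to_del.length - j)
decreasing_by
  · simp; omega
  · simp; omega
  · simp

theorem pvAloop_eq_pvAux (orig to_del : List Int) (i j : Nat) (cnt : Int) :
    pvAloop orig to_del i j cnt = pvAux to_del (orig.drop i) j cnt := by
  induction orig, i, j, cnt using pvAloop.induct (to_del := to_del) with
  | case1 orig i j cnt h heq ih =>
    rw [pvAloop, dif_pos h, if_pos heq, ih]
    have hd : orig.drop i = orig[i] :: orig.drop (i + 1) :=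
      List.drop_eq_getElem_cons h.1
    have he : (orig.eraseIdx i).drop i = orig.drop (i + 1) := by
      rw [List.eraseIdx_eq_take_drop_succ, List.drop_append]
      simp [Nat.min_eq_left (Nat.le_of_lt h.1)]
    rw [he]
    conv_rhs => rw [hd, pvAux]
    rw [dif_pos h.2, if_pos heq]
  | case2 orig i j cnt h heq hgt ih =>
    rw [pvAloop, dif_pos h, if_neg heq, if_pos hgt, ih]
    have hd : orig.drop i = orig[i] :: orig.drop (i + 1) :=
      List.drop_eq_getElem_cons h.1
    conv_rhs => rw [hd, pvAux]
    rw [dif_pos h.2, if_neg heq, if_pos hgt, ← hd]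
  | case3 orig i j cnt h heq hgt ih =>
    rw [pvAloop, dif_pos h, if_neg heq, if_neg hgt, ih]
    have hd : orig.drop i = orig[i] :: orig.drop (i + 1) :=
      List.drop_eq_getElem_cons h.1
    conv_rhs => rw [hd, pvAux]
    rw [dif_pos h.2, if_neg heq, if_neg hgt]
  | case4 orig i j cnt h =>
    rw [pvAloop, dif_neg h]
    rcases Nat.lt_or_ge i orig.length with hi | hi
    · have hj : ¬ j < to_del.length := fun hj => h ⟨hi, hj⟩
      have hd : orig.drop i = orig[i] :: orig.drop (i + 1) :=
        List.drop_eq_getElem_cons hi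
      rw [hd, pvAux, dif_neg hj]
    · rw [List.drop_eq_nil_of_le hi, pvAux]

theorem pvBSkip_not_lt (to_del : List Int) (x : Int) (j : Nat)
    (h : pvBSkip to_del x j < to_del.length) :
    ¬ to_del[pvBSkip to_del x j] < x := by
  induction j using pvBSkip.induct (to_del := to_del) (x := x) with
  | case1 j hj hlt ih =>
    have hs : pvBSkip to_del x j = pvBSkip to_del x (j + 1) := by
      rw [pvBSkip, dif_pos hj, if_pos hlt]
    simp only [hs] at h ⊢
    exact ih h
  | case2 j hj hlt =>
    have hs : pvBSkip to_del x j = j := by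
      rw [pvBSkip, dif_pos hj, if_neg hlt]
    simp only [hs] at h ⊢
    exact hlt
  | case3 j hj =>
    have hs : pvBSkip to_del x j = j := by rw [pvBSkip, dif_neg hj]
    simp only [hs] at h
    exact absurd h hj

theorem pvBGo_of_ge (to_del xs : List Int) (j : Nat) (cnt : Int)
    (h : to_del.length ≤ j) : pvBGo to_del xs j cnt = cnt := by
  induction xs generalizing j cnt with
  | nil => rfl
  | cons x rest ih =>
    have hs : pvBSkip to_del x j = j := by
      rw [pvBSkip, dif_neg (by omega)]
    rw [pvBGo]
    simp only [hs]
    rw [dif_neg (by omega)]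
    exact ih j cnt h

theorem pvAux_skip (to_del : List Int) (x : Int) (rest : List Int) (j : Nat) (cnt : Int) :
    pvAux to_del (x :: rest) j cnt = pvAux to_del (x :: rest) (pvBSkip to_del x j) cnt := by
  induction j using pvBSkip.induct (to_del := to_del) (x := x) with
  | case1 j hj hlt ih =>
    have hs : pvBSkip to_del x j = pvBSkip to_del x (j + 1) := by
      rw [pvBSkip, dif_pos hj, if_pos hlt]
    rw [hs, ← ih, pvAux, dif_pos hj, if_neg (by omega), if_pos hlt]
  | case2 j hj hlt =>
    have hs : pvBSkip to_del x j = j := by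
      rw [pvBSkip, dif_pos hj, if_neg hlt]
    rw [hs]
  | case3 j hj =>
    have hs : pvBSkip to_del x j = j := by rw [pvBSkip, dif_neg hj]
    rw [hs]

theorem pvAux_eq_pvBGo (to_del xs : List Int) (j : Nat) (cnt : Int) :
    pvAux to_del xs j cnt = pvBGo to_del xs j cnt := by
  induction xs generalizing j cnt with
  | nil => simp [pvAux, pvBGo]
  | cons x rest ih =>
    rw [pvAux_skip, pvBGo]
    set j' := pvBSkip to_del x j with hj'
    by_cases h : j' < to_del.length
    · have hnl : ¬ to_del[j'] < x := pvBSkip_not_lt to_del x j h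
      simp only [dif_pos h]
      rw [pvAux, dif_pos h]
      by_cases heq : to_del[j'] = x
      · rw [if_pos (heq.symm), if_pos heq, ih]
      · rw [if_neg (fun hx => heq hx.symm), if_neg heq,
           if_neg (by omega), ih]
    · simp only [dif_neg h]
      rw [pvAux, dif_neg h, pvBGo_of_ge _ _ _ _ (by omega)]

-- ===== VERDICT (by name: the statement is the Claim_ definition above) =====
theorem del_sorted_from_sorted_py_spec : Claim_equal_del_sorted_from_sorted_py := by
  intro orig to_del _
  unfold Spec_del_sorted_from_sorted_py del_sorted_from_sorted_py del_sorted_from_sorted_py_alt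
  rw [pvAloop_eq_pvAux, List.drop_zero, pvAux_eq_pvBGo]
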